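-- pv_equiv track=rewrite | github.com/nikhilsanghi/ciq | src/evaluation/metrics.py | _dicts_equal
-- ===== SOURCE A (Python) =====
-- def _dicts_equal(d1: dict, d2: dict) -> bool:
--     """Check if two dictionaries are equal (case-insensitive values)."""
--     if set(d1.keys()) != set(d2.keys()):
--         return False
--
--     for key in d1:
--         v1 = str(d1[key]).lower().strip() if d1[key] is not None else ""
--         v2 = str(d2[key]).lower().strip() if d2[key] is not None else ""
--         if v1 != v2:
--             return False
--
--     return True
-- ===== SOURCE B (Python) =====
-- def _dicts_equal(d1: dict, d2: dict) -> bool: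
--     """Check if two dictionaries are equal (case-insensitive values)."""
--     def canon(d):
--         return sorted((k, str(v).lower().strip() if v is not None else "")
--                       for k, v in d.items())
--     return canon(d1) == canon(d2)
-- ===== Notes on version B (the rewrite author's own statement) =====
-- stated objective: alternative
-- what changed: Replaces A's key-set comparison plus per-key lookup loop with canonicalization: each dict becomes a sorted list of (key, normalized value) pairs and the two lists are compared once; correct because dict keys are unique, so the sorted pair lists coincide exactly when the key sets and the normalized values per key coincide.
import Mathlib
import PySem

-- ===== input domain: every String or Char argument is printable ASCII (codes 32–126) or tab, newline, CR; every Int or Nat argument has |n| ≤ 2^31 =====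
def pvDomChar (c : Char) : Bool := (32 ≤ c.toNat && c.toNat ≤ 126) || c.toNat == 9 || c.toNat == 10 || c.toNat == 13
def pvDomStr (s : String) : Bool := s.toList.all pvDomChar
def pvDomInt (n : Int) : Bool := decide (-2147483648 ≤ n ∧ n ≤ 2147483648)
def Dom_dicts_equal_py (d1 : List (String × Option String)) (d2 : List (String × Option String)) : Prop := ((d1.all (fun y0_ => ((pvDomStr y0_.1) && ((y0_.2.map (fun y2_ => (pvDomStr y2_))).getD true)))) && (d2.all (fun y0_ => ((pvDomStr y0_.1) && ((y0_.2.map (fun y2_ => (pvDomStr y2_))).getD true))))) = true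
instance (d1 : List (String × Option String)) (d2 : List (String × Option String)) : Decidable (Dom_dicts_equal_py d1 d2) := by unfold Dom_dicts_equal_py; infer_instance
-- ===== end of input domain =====

-- B replaces A's two-phase check (key-set equality, then a per-key lookup loop) with
-- canonicalization: each dict becomes a SORTED list of (key, normalized value) pairs,
-- compared once; objective: alternative algorithm of similar cost.

-- shared helper: str(v).lower().strip() if v is not None else ""  (both Pythons contain this expression verbatim)
def pvNorm (v : Option String) : String :=
  match v with
  | none => ""
  | some s => PySem.Str.strip (PySem.Str.lower s)

-- ===== PORT A =====
def dicts_equal_py (d1 : List (String × Option String)) (d2 : List (String × Option String)) : Bool :=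
  let D1 := PySem.Dict.ofList d1
  let D2 := PySem.Dict.ofList d2
  if !(PySem.Set.equal (PySem.Set.ofList D1.keys) (PySem.Set.ofList D2.keys)) then false
  else
    -- for key in d1: … ; d2[key] cannot raise KeyError here (key sets are equal), so getD is exact
    D1.items.all (fun kv => pvNorm kv.2 == pvNorm (D2.getD kv.1 none))

-- ===== PORT B =====
-- canon(d) = sorted((k, norm(v)) for k, v in d.items()); sorted on 2-tuples is sorted2 fst snd
def pvCanon (d : List (String × Option String)) : List (String × String) :=
  PySem.List.sorted2 (((PySem.Dict.ofList d).items).map (fun kv => (kv.1, pvNorm kv.2)))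
    Prod.fst Prod.snd

def dicts_equal_py_alt (d1 : List (String × Option String)) (d2 : List (String × Option String)) : Bool :=
  pvCanon d1 == pvCanon d2

-- ===== PRECONDITION & SPEC =====
def Spec_dicts_equal_py (d1 : List (String × Option String)) (d2 : List (String × Option String)) (out : Bool) : Prop := out = dicts_equal_py_alt d1 d2
instance (d1 : List (String × Option String)) (d2 : List (String × Option String)) (out : Bool) : Decidable (Spec_dicts_equal_py d1 d2 out) := by unfold Spec_dicts_equal_py; infer_instance

-- ===== CLAIM (what is proved, stated in full; the proofs are below) =====
def Claim_equal_dicts_equal_py : Prop := ∀ (d1 : List (String × Option String)) (d2 : List (String × Option String)), Dom_dicts_equal_py d1 d2 → Spec_dicts_equal_py d1 d2 (dicts_equal_py d1 d2)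

-- ===== LEMMAS AND PROOFS =====

-- the (non-strict) lexicographic order on String × String that B's sort realises
def pvLexLe (a b : String × String) : Prop := a.1 < b.1 ∨ (a.1 = b.1 ∧ a.2 ≤ b.2)

-- Python's tuple comparison used by sorted2 fst snd
def pvBefore (a b : String × String) : Bool :=
  decide (a.1 < b.1) || (!decide (b.1 < a.1) && decide (a.2 < b.2))

theorem pvLexLe_antisymm (a b : String × String) (hab : pvLexLe a b) (hba : pvLexLe b a) : a = b := by
  unfold pvLexLe at hab hba
  rcases hab with h | ⟨h1, h2⟩ <;> rcases hba with h' | ⟨h1', h2'⟩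
  · exact absurd (h.trans h') (lt_irrefl _)
  · exact absurd h (h1' ▸ lt_irrefl _)
  · exact absurd h' (h1 ▸ lt_irrefl _)
  · exact Prod.ext h1 (le_antisymm h2 h2')

theorem pvLexLe_trans (a b c : String × String) (hab : pvLexLe a b) (hbc : pvLexLe b c) : pvLexLe a c := by
  unfold pvLexLe at *
  rcases hab with h | ⟨h1, h2⟩ <;> rcases hbc with h' | ⟨h1', h2'⟩
  · exact Or.inl (h.trans h')
  · exact Or.inl (h1' ▸ h)
  · exact Or.inl (h1 ▸ h')
  · exact Or.inr ⟨h1.trans h1', h2.trans h2'⟩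

theorem pvBefore_true (a b : String × String) (h : pvBefore a b = true) : pvLexLe a b := by
  unfold pvBefore at h
  unfold pvLexLe
  simp only [Bool.or_eq_true, Bool.and_eq_true, Bool.not_eq_true', decide_eq_true_eq,
    decide_eq_false_iff_not] at h
  rcases h with h | ⟨h1, h2⟩
  · exact Or.inl h
  · rcases lt_or_ge a.1 b.1 with hl | hl
    · exact Or.inl hl
    · exact Or.inr ⟨le_antisymm (not_lt.mp h1) hl, le_of_lt h2⟩

theorem pvBefore_false (a b : String × String) (h : pvBefore a b = false) : pvLexLe b a := by
  unfold pvBefore at h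
  unfold pvLexLe
  simp only [Bool.or_eq_false_iff, Bool.and_eq_false_iff, Bool.not_eq_false',
    decide_eq_true_eq, decide_eq_false_iff_not] at h
  rcases h with ⟨h1, h2⟩
  rcases h2 with h2 | h2
  · exact Or.inl h2
  · rcases lt_trichotomy b.1 a.1 with hl | hl | hl
    · exact Or.inl hl
    · exact Or.inr ⟨hl, not_lt.mp h2⟩
    · exact absurd hl h1

-- inserting into a pvLexLe-sorted list keeps it sorted
theorem pv_insertBy_pairwise (x : String × String) (ys : List (String × String))
    (h : ys.Pairwise pvLexLe) :
    (PySem.List.insertBy pvBefore x ys).Pairwise pvLexLe := by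
  induction ys with
  | nil => simp [PySem.List.insertBy]
  | cons y ys ih =>
      rw [PySem.List.insertBy]
      rcases List.pairwise_cons.mp h with ⟨hy, hys⟩
      by_cases hb : pvBefore x y = true
      · rw [if_pos hb]
        refine List.pairwise_cons.mpr ⟨?_, h⟩
        intro z hz
        rcases List.mem_cons.mp hz with rfl | hz
        · exact pvBefore_true x z hb
        · exact pvLexLe_trans _ _ _ (pvBefore_true x y hb) (hy _ hz)
      · rw [if_neg hb]
        refine List.pairwise_cons.mpr ⟨?_, ih hys⟩
        intro z hz
        rcases (PySem.List.mem_insertBy _ _ _ _).mp hz with rfl | hz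
        · exact pvBefore_false z y (eq_false_of_ne_true hb)
        · exact hy _ hz

theorem pv_foldl_insertBy_pairwise (xs acc : List (String × String))
    (h : acc.Pairwise pvLexLe) :
    (xs.foldl (fun acc x => PySem.List.insertBy pvBefore x acc) acc).Pairwise pvLexLe := by
  induction xs generalizing acc with
  | nil => exact h
  | cons x xs ih => exact ih _ (pv_insertBy_pairwise x acc h)

theorem pv_sorted2_eq_foldl (xs : List (String × String)) :
    PySem.List.sorted2 xs Prod.fst Prod.snd
      = xs.foldl (fun acc x => PySem.List.insertBy pvBefore x acc) [] := rfl

theorem pv_sorted2_pairwise (xs : List (String × String)) :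
    (PySem.List.sorted2 xs Prod.fst Prod.snd).Pairwise pvLexLe := by
  rw [pv_sorted2_eq_foldl]
  exact pv_foldl_insertBy_pairwise xs [] (by simp)

-- the canonical form characterisation: sorted pair lists are equal iff the inputs are permutations
theorem pv_sorted2_eq_iff_perm (l1 l2 : List (String × String)) :
    PySem.List.sorted2 l1 Prod.fst Prod.snd = PySem.List.sorted2 l2 Prod.fst Prod.snd
      ↔ l1.Perm l2 := by
  constructor
  · intro h
    exact ((PySem.List.sorted2_perm l1 Prod.fst Prod.snd false).symm.trans
      (h ▸ PySem.List.sorted2_perm l2 Prod.fst Prod.snd false))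
  · intro hp
    refine List.Perm.eq_of_pairwise (fun a b _ _ => pvLexLe_antisymm a b)
      (pv_sorted2_pairwise l1) (pv_sorted2_pairwise l2) ?_
    exact (PySem.List.sorted2_perm l1 Prod.fst Prod.snd false).trans
      (hp.trans (PySem.List.sorted2_perm l2 Prod.fst Prod.snd false).symm)

-- membership in the normalized item list of a dict with nodup keys
theorem pv_mem_normList (d : PySem.Dict String (Option String)) (hnd : d.keys.Nodup)
    (x : String × String) :
    x ∈ d.items.map (fun kv => (kv.1, pvNorm kv.2))
      ↔ ∃ v, d.get? x.1 = some v ∧ x.2 = pvNorm v := by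
  constructor
  · intro hx
    obtain ⟨kv, hkv, hx⟩ := List.mem_map.mp hx
    refine ⟨kv.2, ?_, ?_⟩
    · rw [← hx]
      exact (PySem.Dict.get?_eq_some_iff_mem_items d kv.1 kv.2 hnd).mpr hkv
    · rw [← hx]
  · rintro ⟨v, hv, hx2⟩
    refine List.mem_map.mpr ⟨(x.1, v), (PySem.Dict.get?_eq_some_iff_mem_items d x.1 v hnd).mp hv, ?_⟩
    exact Prod.ext rfl hx2.symm

theorem pv_main (d1 d2 : List (String × Option String)) :
    dicts_equal_py d1 d2 = dicts_equal_py_alt d1 d2 := by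
  unfold dicts_equal_py dicts_equal_py_alt pvCanon
  set D1 := PySem.Dict.ofList d1 with hD1
  set D2 := PySem.Dict.ofList d2 with hD2
  have h1 : D1.keys.Nodup := PySem.Dict.nodup_keys_ofList d1
  have h2 : D2.keys.Nodup := PySem.Dict.nodup_keys_ofList d2
  set L1 := D1.items.map (fun kv => (kv.1, pvNorm kv.2)) with hL1
  set L2 := D2.items.map (fun kv => (kv.1, pvNorm kv.2)) with hL2
  have hfst1 : L1.map Prod.fst = D1.keys := by
    rw [hL1, List.map_map]; rfl
  have hfst2 : L2.map Prod.fst = D2.keys := by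
    rw [hL2, List.map_map]; rfl
  have hnd1 : L1.Nodup := (hfst1 ▸ h1).of_map Prod.fst
  have hnd2 : L2.Nodup := (hfst2 ▸ h2).of_map Prod.fst
  -- a key of a dict has a value under get?
  have hsome2 : ∀ k, k ∈ D2.keys → ∃ w, D2.get? k = some w := by
    intro k hk
    rcases ho : D2.get? k with _ | w
    · exact absurd ((PySem.Dict.get?_eq_none_iff_not_mem_keys D2 k).mp ho) (by simp [hk])
    · exact ⟨w, rfl⟩
  have hsome1 : ∀ k, k ∈ D1.keys → ∃ w, D1.get? k = some w := by
    intro k hk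
    rcases ho : D1.get? k with _ | w
    · exact absurd ((PySem.Dict.get?_eq_none_iff_not_mem_keys D1 k).mp ho) (by simp [hk])
    · exact ⟨w, rfl⟩
  rw [Bool.eq_iff_iff]
  simp only [beq_iff_eq]
  rw [pv_sorted2_eq_iff_perm, List.perm_ext_iff_of_nodup hnd1 hnd2]
  constructor
  · intro hA
    cases hc : (PySem.Set.ofList D1.keys).equal (PySem.Set.ofList D2.keys) with
    | false => rw [hc] at hA; simp at hA
    | true =>
      rw [hc] at hA; simp only [Bool.not_true, Bool.false_eq_true, if_false,
        List.all_eq_true, beq_iff_eq] at hA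
      have hkeys : ∀ x, x ∈ D1.keys ↔ x ∈ D2.keys := by
        intro x
        have := (PySem.Set.equal_iff _ _).mp hc x
        simpa [PySem.Set.mem_ofList] using this
      intro x
      rw [pv_mem_normList D1 h1 x, pv_mem_normList D2 h2 x]
      constructor
      · rintro ⟨v, hv, hx2⟩
        have hmem1 : (x.1, v) ∈ D1.items := (PySem.Dict.get?_eq_some_iff_mem_items D1 x.1 v h1).mp hv
        obtain ⟨w, hw⟩ := hsome2 x.1 ((hkeys x.1).mp (PySem.Dict.mem_keys_of_mem_items D1 hmem1))
        have hv' := hA (x.1, v) hmem1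
        rw [PySem.Dict.getD_eq_get?_getD, hw] at hv'
        simp only [Option.getD_some] at hv'
        exact ⟨w, hw, hx2.trans hv'⟩
      · rintro ⟨v, hv, hx2⟩
        have hk2 : x.1 ∈ D2.keys :=
          PySem.Dict.mem_keys_of_mem_items D2 ((PySem.Dict.get?_eq_some_iff_mem_items D2 x.1 v h2).mp hv)
        have hk1 : x.1 ∈ D1.keys := (hkeys x.1).mpr hk2
        obtain ⟨w, ho⟩ := hsome1 x.1 hk1
        have hv' := hA (x.1, w) ((PySem.Dict.get?_eq_some_iff_mem_items D1 x.1 w h1).mp ho)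
        rw [PySem.Dict.getD_eq_get?_getD, hv] at hv'
        simp only [Option.getD_some] at hv'
        exact ⟨w, ho, hx2.trans hv'.symm⟩
  · intro hmem
    have hkeys : ∀ x, x ∈ D1.keys ↔ x ∈ D2.keys := by
      intro k
      rw [← hfst1, ← hfst2]
      constructor
      · intro hk
        obtain ⟨p, hp, hpk⟩ := List.mem_map.mp hk
        exact List.mem_map.mpr ⟨p, (hmem p).mp hp, hpk⟩
      · intro hk
        obtain ⟨p, hp, hpk⟩ := List.mem_map.mp hk
        exact List.mem_map.mpr ⟨p, (hmem p).mpr hp, hpk⟩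
    have hc : (PySem.Set.ofList D1.keys).equal (PySem.Set.ofList D2.keys) = true := by
      apply (PySem.Set.equal_iff _ _).mpr
      intro x
      simpa [PySem.Set.mem_ofList] using hkeys x
    rw [hc]
    simp only [Bool.not_true, Bool.false_eq_true, if_false, List.all_eq_true, beq_iff_eq]
    intro kv hkv
    have hx1 : (kv.1, pvNorm kv.2) ∈ L1 := List.mem_map.mpr ⟨kv, hkv, rfl⟩
    obtain ⟨v, hv, hx2⟩ := (pv_mem_normList D2 h2 _).mp ((hmem _).mp hx1)
    rw [PySem.Dict.getD_eq_get?_getD, hv]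
    simp only [Option.getD_some]
    exact hx2

-- ===== VERDICT (by name: the statement is the Claim_ definition above) =====
theorem dicts_equal_py_spec : Claim_equal_dicts_equal_py := by
  intro d1 d2 _
  unfold Spec_dicts_equal_py
  exact pv_main d1 d2
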